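-- pv_equiv track=rewrite | github.com/wustl-oncology/cloud-workflows | scripts/validate_immuno_yaml.py | check_commented_blocks
-- ===== SOURCE A (Python) =====
-- def check_commented_blocks(yaml_text):
--     results = []
--     checks = {
--         'problematic_amino_acids': {
--             'keyword': 'immuno.problematic_amino_acids:',
--             'no_text_message': "No problematic amino acids in this run",
--             'has_text_message': "Problematic amino acids selected:"
--         },
--         'clinical_mhc_classI_alleles': {
--             'keyword': 'immuno.clinical_mhc_classI_alleles:',
--             'no_text_message': "Class I HLA alleles commented out",
--             'has_text_message': "Class I HLA alleles selected:"
--         },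
--         'clinical_mhc_classII_alleles': {
--             'keyword': 'immuno.clinical_mhc_classII_alleles:',
--             'no_text_message': "Class II HLA alleles commented out",
--             'has_text_message': "Class II HLA alleles selected:"
--         }
--     }
--     lines = yaml_text.splitlines()
--     for check_name, check_info in checks.items():
--         found = False
--         for idx, line in enumerate(lines):
--             if check_info['keyword'] in line:
--                 found = True
--                 if line.strip().startswith('#'):
--                     results.append(check_info['no_text_message'])
--                 else:
--                     results.append(check_info['has_text_message'])
--                     j = idx + 1
--                     while j < len(lines):
--                         next_line = lines[j].strip()
--                         if next_line.startswith('#') or next_line.startswith('immuno.'):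
--                             break
--                         if next_line:
--                             results.append(f"  {next_line}")
--                         j += 1
--                 break
--         if not found:
--             results.append(f"{check_name} not found in YAML")
--     return results
-- ===== SOURCE B (Python) =====
-- def check_commented_blocks(yaml_text):
--     checks = [
--         ('problematic_amino_acids', 'immuno.problematic_amino_acids:',
--          "No problematic amino acids in this run", "Problematic amino acids selected:"),
--         ('clinical_mhc_classI_alleles', 'immuno.clinical_mhc_classI_alleles:',
--          "Class I HLA alleles commented out", "Class I HLA alleles selected:"),
--         ('clinical_mhc_classII_alleles', 'immuno.clinical_mhc_classII_alleles:',
--          "Class II HLA alleles commented out", "Class II HLA alleles selected:"),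
--     ]
--     lines = yaml_text.splitlines()
--     keywords = [c[1] for c in checks]
--     # one pass: keyword -> index of its first containing line
--     index = {}
--     for i, line in enumerate(lines):
--         for kw in keywords:
--             if kw not in index and kw in line:
--                 index[kw] = i
--     results = []
--     for name, kw, no_msg, has_msg in checks:
--         if kw not in index:
--             results.append(name + " not found in YAML")
--             continue
--         stripped = [l.strip() for l in lines[index[kw]:]]
--         head, rest = stripped[0], stripped[1:]
--         if head.startswith('#'):
--             results.append(no_msg)
--         else:
--             results.append(has_msg)
--             for s in rest:
--                 if s.startswith('#') or s.startswith('immuno.'):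
--                     break
--                 if s:
--                     results.append('  ' + s)
--     return results
-- ===== Notes on version B (the rewrite author's own statement) =====
-- stated objective: alternative
-- what changed: A re-scans all lines from the top for each of the three keyword checks; B makes one indexing pass building a dict keyword->first containing line index, then handles the three checks by dict lookup, taking the stripped tail slice for the sub-block walk.
import Mathlib
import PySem

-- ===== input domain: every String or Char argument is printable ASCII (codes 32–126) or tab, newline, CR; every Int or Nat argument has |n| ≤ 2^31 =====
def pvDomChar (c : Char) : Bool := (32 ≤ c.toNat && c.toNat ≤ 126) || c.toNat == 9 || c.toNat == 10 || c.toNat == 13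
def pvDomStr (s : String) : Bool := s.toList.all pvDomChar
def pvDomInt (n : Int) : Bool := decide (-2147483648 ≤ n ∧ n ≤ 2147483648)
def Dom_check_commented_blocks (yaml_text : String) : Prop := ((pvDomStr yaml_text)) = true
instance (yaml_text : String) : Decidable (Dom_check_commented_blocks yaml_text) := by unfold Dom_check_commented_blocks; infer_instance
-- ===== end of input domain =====

-- B replaces A's three full re-scans of the lines by one indexing pass (keyword -> first
-- containing line) followed by per-check lookups; objective: alternative decomposition.

-- ===== PORT A =====
-- A's inner while loop from idx+1: walks the remaining lines, stops on '#'/'immuno.', emits nonblank stripped lines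
def pvSubBlockA : List String → List String
  | [] => []
  | l :: rest =>
    let s := PySem.Str.strip l
    if PySem.Str.startswith s "#" || PySem.Str.startswith s "immuno." then []
    else (if s ≠ "" then ["  " ++ s] else []) ++ pvSubBlockA rest

-- A's 'for idx, line in enumerate(lines)' with break / not-found handling, for one check
def pvScanA (kw noMsg hasMsg nfMsg : String) : List String → List String
  | [] => [nfMsg]
  | line :: rest =>
    if PySem.Str.isIn kw line then
      if PySem.Str.startswith (PySem.Str.strip line) "#" then [noMsg]
      else hasMsg :: pvSubBlockA rest
    else pvScanA kw noMsg hasMsg nfMsg rest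

def check_commented_blocks (yaml_text : String) : List String :=
  let lines := PySem.Str.splitlines yaml_text
  pvScanA "immuno.problematic_amino_acids:" "No problematic amino acids in this run"
      "Problematic amino acids selected:" "problematic_amino_acids not found in YAML" lines
  ++ pvScanA "immuno.clinical_mhc_classI_alleles:" "Class I HLA alleles commented out"
      "Class I HLA alleles selected:" "clinical_mhc_classI_alleles not found in YAML" lines
  ++ pvScanA "immuno.clinical_mhc_classII_alleles:" "Class II HLA alleles commented out"
      "Class II HLA alleles selected:" "clinical_mhc_classII_alleles not found in YAML" lines

-- ===== PORT B =====
def pvKeywordsB : List String :=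
  ["immuno.problematic_amino_acids:", "immuno.clinical_mhc_classI_alleles:",
   "immuno.clinical_mhc_classII_alleles:"]

-- B's single indexing pass: keyword -> index of its first containing line
def pvBuildIndexB (lines : List String) : PySem.Dict String Int :=
  (PySem.List.enumerate lines 0).foldl
    (fun d p => pvKeywordsB.foldl
      (fun d kw => if !(d.contains kw) && PySem.Str.isIn kw p.2 then d.insert kw p.1 else d) d)
    PySem.Dict.empty

-- B's 'for s in rest' walk over the already-stripped tail
def pvBlockB : List String → List String
  | [] => []
  | s :: rest =>
    if PySem.Str.startswith s "#" || PySem.Str.startswith s "immuno." then []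
    else (if s ≠ "" then ["  " ++ s] else []) ++ pvBlockB rest

-- B's per-check body: dict lookup instead of a scan
def pvCheckB (lines : List String) (idx : PySem.Dict String Int)
    (name kw noMsg hasMsg : String) : List String :=
  match idx.get? kw with
  | none => [name ++ " not found in YAML"]
  | some i =>
    match (PySem.List.slice lines (some i) none).map PySem.Str.strip with
    | [] => []   -- unreachable: the stored index is a valid index into lines
    | head :: rest =>
      if PySem.Str.startswith head "#" then [noMsg]
      else hasMsg :: pvBlockB rest

def check_commented_blocks_alt (yaml_text : String) : List String :=
  let lines := PySem.Str.splitlines yaml_text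
  let idx := pvBuildIndexB lines
  pvCheckB lines idx "problematic_amino_acids" "immuno.problematic_amino_acids:"
      "No problematic amino acids in this run" "Problematic amino acids selected:"
  ++ pvCheckB lines idx "clinical_mhc_classI_alleles" "immuno.clinical_mhc_classI_alleles:"
      "Class I HLA alleles commented out" "Class I HLA alleles selected:"
  ++ pvCheckB lines idx "clinical_mhc_classII_alleles" "immuno.clinical_mhc_classII_alleles:"
      "Class II HLA alleles commented out" "Class II HLA alleles selected:"

-- ===== PRECONDITION & SPEC =====
def Spec_check_commented_blocks (yaml_text : String) (out : List String) : Prop := out = check_commented_blocks_alt yaml_text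
instance (yaml_text : String) (out : List String) : Decidable (Spec_check_commented_blocks yaml_text out) := by unfold Spec_check_commented_blocks; infer_instance

-- ===== CLAIM (what is proved, stated in full; the proofs are below) =====
def Claim_equal_check_commented_blocks : Prop := ∀ (yaml_text : String), Dom_check_commented_blocks yaml_text → Spec_check_commented_blocks yaml_text (check_commented_blocks yaml_text)

-- ===== LEMMAS AND PROOFS =====

-- proof-side spec: index of the first line containing kw
def pvFirstIdx (kw : String) : List String → Option Nat
  | [] => none
  | l :: r => if PySem.Str.isIn kw l then some 0 else (pvFirstIdx kw r).map (· + 1)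

theorem pvBlockB_map_strip (rest : List String) :
    pvBlockB (rest.map PySem.Str.strip) = pvSubBlockA rest := by
  induction rest with
  | nil => rfl
  | cons l r ih => simp [pvBlockB, pvSubBlockA, ih]

theorem pvScanA_eq (kw noMsg hasMsg nfMsg : String) (lines : List String) :
    pvScanA kw noMsg hasMsg nfMsg lines =
      match pvFirstIdx kw lines with
      | none => [nfMsg]
      | some i =>
        match lines.drop i with
        | [] => []
        | head :: rest =>
          if PySem.Str.startswith (PySem.Str.strip head) "#" then [noMsg]
          else hasMsg :: pvSubBlockA rest := by
  induction lines with
  | nil => rfl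
  | cons l r ih =>
    simp only [pvScanA, pvFirstIdx, PySem.Str.isIn_eq]
    by_cases h : PySem.Chars.isIn kw.toList l.toList = true
    · simp [h]
    · simp only [h, Bool.false_eq_true, if_false, ih]
      cases hf : pvFirstIdx kw r with
      | none => simp
      | some i => simp [List.drop_succ_cons]

theorem pvStepGet (kw : String) (hkw : kw ∈ pvKeywordsB) (d : PySem.Dict String Int)
    (s : Int) (x : String) :
    (pvKeywordsB.foldl
        (fun d k => if !(d.contains k) && PySem.Str.isIn k x then d.insert k s else d) d).get? kw
      = if d.contains kw = false ∧ PySem.Str.isIn kw x = true then some s else d.get? kw := by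
  simp only [pvKeywordsB, List.mem_cons, List.not_mem_nil, or_false] at hkw
  rcases hkw with h | h | h <;> subst h <;>
    simp only [pvKeywordsB, List.foldl] <;>
    split_ifs <;>
    simp_all [PySem.Dict.get?_insert_self, PySem.Dict.get?_insert_of_ne,
      PySem.Dict.contains_insert, Bool.and_eq_true, Bool.not_eq_eq_eq_not, Bool.not_true,
      Bool.not_false]

theorem pvIndexLoop (kw : String) (hkw : kw ∈ pvKeywordsB) (lines : List String) :
    ∀ (s : Int) (d : PySem.Dict String Int),
    ((PySem.List.enumerate lines s).foldl
        (fun d p => pvKeywordsB.foldl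
          (fun d k => if !(d.contains k) && PySem.Str.isIn k p.2 then d.insert k p.1 else d) d)
        d).get? kw
      = match d.get? kw with
        | some v => some v
        | none => (pvFirstIdx kw lines).map (fun n => s + Int.ofNat n) := by
  induction lines with
  | nil =>
    intro s d
    simp only [PySem.List.enumerate_nil, List.foldl_nil, pvFirstIdx]
    cases d.get? kw <;> simp
  | cons l r ih =>
    intro s d
    rw [PySem.List.enumerate_cons, List.foldl_cons, ih]
    rw [pvStepGet kw hkw]
    by_cases hc : d.get? kw = none
    · have hcon : d.contains kw = false := by
        rw [PySem.Dict.contains_eq_isSome_get?, hc]; rfl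
      simp only [hcon, hc, pvFirstIdx, PySem.Str.isIn_eq, true_and]
      by_cases hin : PySem.Chars.isIn kw.toList l.toList = true
      · simp [hin]
      · simp only [hin, Bool.false_eq_true, if_false]
        cases hf : pvFirstIdx kw r with
        | none => simp
        | some n =>
          simp only [Option.map_some]
          congr 1
          simp only [Int.ofNat_eq_natCast]
          push_cast
          ring
    · cases hg : d.get? kw with
      | none => exact absurd hg hc
      | some v =>
        have hcon : d.contains kw = true := by
          rw [PySem.Dict.contains_eq_isSome_get?, hg]; rfl
        simp [hcon]

theorem pvBuildIndexB_get (kw : String) (hkw : kw ∈ pvKeywordsB) (lines : List String) :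
    (pvBuildIndexB lines).get? kw = (pvFirstIdx kw lines).map Int.ofNat := by
  rw [pvBuildIndexB, pvIndexLoop kw hkw lines 0 PySem.Dict.empty]
  simp only [PySem.Dict.get?_empty]
  cases pvFirstIdx kw lines <;> simp [Int.ofNat_eq_natCast]

theorem pvCheckB_eq_scanA (lines : List String) (name kw noMsg hasMsg nfMsg : String)
    (hkw : kw ∈ pvKeywordsB) (hnf : name ++ " not found in YAML" = nfMsg) :
    pvCheckB lines (pvBuildIndexB lines) name kw noMsg hasMsg
      = pvScanA kw noMsg hasMsg nfMsg lines := by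
  rw [pvScanA_eq, pvCheckB, pvBuildIndexB_get kw hkw]
  cases hf : pvFirstIdx kw lines with
  | none => simp [hnf]
  | some n =>
    simp only [Option.map_some]
    rw [PySem.List.slice_from _ (by exact Int.natCast_nonneg n)]
    simp only [Int.ofNat_eq_natCast, Int.toNat_natCast]
    cases hd : lines.drop n with
    | nil => simp
    | cons head rest => simp [pvBlockB_map_strip]

theorem pvCheck1 (lines : List String) :
    pvCheckB lines (pvBuildIndexB lines) "problematic_amino_acids"
        "immuno.problematic_amino_acids:" "No problematic amino acids in this run"
        "Problematic amino acids selected:"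
      = pvScanA "immuno.problematic_amino_acids:" "No problematic amino acids in this run"
          "Problematic amino acids selected:" "problematic_amino_acids not found in YAML" lines :=
  pvCheckB_eq_scanA _ _ _ _ _ _ (by simp [pvKeywordsB]) rfl

theorem pvCheck2 (lines : List String) :
    pvCheckB lines (pvBuildIndexB lines) "clinical_mhc_classI_alleles"
        "immuno.clinical_mhc_classI_alleles:" "Class I HLA alleles commented out"
        "Class I HLA alleles selected:"
      = pvScanA "immuno.clinical_mhc_classI_alleles:" "Class I HLA alleles commented out"
          "Class I HLA alleles selected:" "clinical_mhc_classI_alleles not found in YAML" lines :=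
  pvCheckB_eq_scanA _ _ _ _ _ _ (by simp [pvKeywordsB]) rfl

theorem pvCheck3 (lines : List String) :
    pvCheckB lines (pvBuildIndexB lines) "clinical_mhc_classII_alleles"
        "immuno.clinical_mhc_classII_alleles:" "Class II HLA alleles commented out"
        "Class II HLA alleles selected:"
      = pvScanA "immuno.clinical_mhc_classII_alleles:" "Class II HLA alleles commented out"
          "Class II HLA alleles selected:" "clinical_mhc_classII_alleles not found in YAML" lines :=
  pvCheckB_eq_scanA _ _ _ _ _ _ (by simp [pvKeywordsB]) rfl

-- ===== VERDICT (by name: the statement is the Claim_ definition above) =====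
theorem check_commented_blocks_spec : Claim_equal_check_commented_blocks := by
  intro yaml_text _
  unfold Spec_check_commented_blocks check_commented_blocks check_commented_blocks_alt
  simp only [pvCheck1, pvCheck2, pvCheck3]
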